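-- pv_equiv track=rewrite | github.com/straight-anon/STRAIGHT | draw_force_line.py | select_frame
-- ===== SOURCE A (Python) =====
-- from typing import Dict, Iterable, List, Optional, Sequence, Tuple, Set
--
-- def select_frame(frames: Dict[int, dict], frame_id: int) -> dict:
--     """Select the requested frame or the closest preceding frame."""
--     if frame_id in frames:
--         return frames[frame_id]
--     sorted_ids = sorted(frames.keys())
--     for idx in reversed(sorted_ids):
--         if idx <= frame_id:
--             return frames[idx]
--     return frames[sorted_ids[0]]
-- ===== SOURCE B (Python) =====
-- def select_frame(frames, frame_id):
--     """Select the requested frame or the closest preceding frame.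
--
--     One linear pass: track the entry with the largest id <= frame_id and
--     the entry with the smallest id overall (fallback when none precedes).
--     """
--     best = None
--     mn = None
--     for k, v in frames.items():
--         if k <= frame_id and (best is None or k >= best[0]):
--             best = (k, v)
--         if mn is None or k < mn[0]:
--             mn = (k, v)
--     if best is not None:
--         return best[1]
--     return mn[1]
-- ===== Notes on version B (the rewrite author's own statement) =====
-- stated objective: alternative
-- what changed: Replaced the sort of all keys plus reverse scan with a single linear pass that tracks the entry with the largest id <= frame_id and the entry with the smallest id (the fallback).
import Mathlib
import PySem

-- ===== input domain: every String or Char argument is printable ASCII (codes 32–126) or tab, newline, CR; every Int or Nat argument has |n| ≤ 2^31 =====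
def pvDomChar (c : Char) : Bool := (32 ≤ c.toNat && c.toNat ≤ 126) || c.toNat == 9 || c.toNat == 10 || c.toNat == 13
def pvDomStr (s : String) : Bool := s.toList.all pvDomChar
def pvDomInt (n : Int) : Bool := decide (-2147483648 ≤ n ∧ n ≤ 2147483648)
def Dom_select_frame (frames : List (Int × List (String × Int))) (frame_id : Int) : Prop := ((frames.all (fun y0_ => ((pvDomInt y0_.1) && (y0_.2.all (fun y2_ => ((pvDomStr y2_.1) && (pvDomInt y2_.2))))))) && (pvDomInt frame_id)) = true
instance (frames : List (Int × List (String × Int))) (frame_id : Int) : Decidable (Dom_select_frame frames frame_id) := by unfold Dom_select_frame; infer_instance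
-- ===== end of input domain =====

-- B replaces A's sort-then-reverse-scan by a single linear pass tracking the max key ≤ frame_id
-- and the min key (fallback): a structurally different algorithm (timing run did not confirm a ≥1.5× speed-up).


-- ===== PORT A =====
def select_frame (frames : List (Int × List (String × Int))) (frame_id : Int) : List (String × Int) :=
  let d := PySem.Dict.ofList frames
  if d.contains frame_id then d.getD frame_id []
  else
    let sorted_ids := PySem.List.sorted d.keys (fun k => k)
    -- 'for idx in reversed(sorted_ids): if idx <= frame_id: return frames[idx]'
    match sorted_ids.reverse.find? (fun idx => decide (idx ≤ frame_id)) with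
    | some idx => d.getD idx []
    | none =>
      -- 'frames[sorted_ids[0]]' (IndexError on empty frames: outside Pre_)
      match PySem.List.pyGet? sorted_ids 0 with
      | some i => d.getD i []
      | none => []

-- ===== PORT B =====
-- loop body of Source B: update 'best' (largest key ≤ frame_id, later wins) and 'mn' (smallest key, earlier wins)
def pvStepB (frame_id : Int)
    (st : Option (Int × List (String × Int)) × Option (Int × List (String × Int)))
    (kv : Int × List (String × Int)) :
    Option (Int × List (String × Int)) × Option (Int × List (String × Int)) :=
  let best := if (decide (kv.1 ≤ frame_id) && (match st.1 with | none => true | some b => decide (b.1 ≤ kv.1)))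
              then some kv else st.1
  let mn := match st.2 with
            | none => some kv
            | some m => if kv.1 < m.1 then some kv else some m
  (best, mn)

def select_frame_alt (frames : List (Int × List (String × Int))) (frame_id : Int) : List (String × Int) :=
  let d := PySem.Dict.ofList frames
  let st := d.items.foldl (pvStepB frame_id) (none, none)
  match st.1 with
  | some b => b.2
  | none =>
    match st.2 with
    | some m => m.2
    | none => []

-- ===== PRECONDITION & SPEC =====
-- A raises (IndexError via sorted_ids[0] / empty dict) exactly when frames is empty and no key ≤ frame_id;
-- we exclude the empty dict, on which both Pythons raise.
def Pre_select_frame (frames : List (Int × List (String × Int))) (frame_id : Int) : Prop := frames ≠ []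
instance (frames : List (Int × List (String × Int))) (frame_id : Int) : Decidable (Pre_select_frame frames frame_id) := by unfold Pre_select_frame; infer_instance
def pvWitness_select_frame : (List (Int × List (String × Int))) × Int := ([(3, [("x", 1)]), (1, [("y", 2)])], 2)

def Spec_select_frame (frames : List (Int × List (String × Int))) (frame_id : Int) (out : List (String × Int)) : Prop := out = select_frame_alt frames frame_id
instance (frames : List (Int × List (String × Int))) (frame_id : Int) (out : List (String × Int)) : Decidable (Spec_select_frame frames frame_id out) := by unfold Spec_select_frame; infer_instance

-- ===== CLAIM (what is proved, stated in full; the proofs are below) =====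
def Claim_equal_select_frame : Prop := ∀ (frames : List (Int × List (String × Int))) (frame_id : Int), Dom_select_frame frames frame_id → Pre_select_frame frames frame_id → Spec_select_frame frames frame_id (select_frame frames frame_id)

-- ===== LEMMAS AND PROOFS =====

-- the two components of B's fold, separated
def pvBStep (frame_id : Int) (b : Option (Int × List (String × Int))) (kv : Int × List (String × Int)) :
    Option (Int × List (String × Int)) :=
  if (decide (kv.1 ≤ frame_id) && (match b with | none => true | some b' => decide (b'.1 ≤ kv.1))) then some kv else b

def pvMStep (m : Option (Int × List (String × Int))) (kv : Int × List (String × Int)) :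
    Option (Int × List (String × Int)) :=
  match m with
  | none => some kv
  | some m' => if kv.1 < m'.1 then some kv else some m'

lemma foldl_pvStepB (frame_id : Int) (l : List (Int × List (String × Int)))
    (b0 m0 : Option (Int × List (String × Int))) :
    l.foldl (pvStepB frame_id) (b0, m0) =
      (l.foldl (pvBStep frame_id) b0, l.foldl pvMStep m0) := by
  induction l generalizing b0 m0 with
  | nil => rfl
  | cons x t ih => simp [List.foldl_cons, pvStepB, pvBStep, pvMStep, ih]

lemma bfold_char (frame_id : Int) (l : List (Int × List (String × Int))) :
    (l.foldl (pvBStep frame_id) none = none ∧ ∀ x ∈ l, ¬ x.1 ≤ frame_id) ∨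
    (∃ b, l.foldl (pvBStep frame_id) none = some b ∧ b ∈ l ∧ b.1 ≤ frame_id ∧
      ∀ x ∈ l, x.1 ≤ frame_id → x.1 ≤ b.1) := by
  induction l using List.reverseRecOn with
  | nil => left; simp
  | append_singleton t a ih =>
    rw [List.foldl_append]
    rcases ih with ⟨hn, hall⟩ | ⟨b, hb, hbm, hble, hmax⟩
    · rw [hn]
      by_cases ha : a.1 ≤ frame_id
      · right
        refine ⟨a, by simp [pvBStep, ha], by simp, ha, ?_⟩
        intro x hx _
        rcases List.mem_append.1 hx with h | h
        · exact absurd ‹x.1 ≤ frame_id› (hall x h)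
        · simp at h; simp [h]
      · left
        constructor
        · simp [pvBStep, ha]
        · intro x hx
          rcases List.mem_append.1 hx with h | h
          · exact hall x h
          · simp at h; simpa [h] using ha
    · rw [hb]
      by_cases ha : a.1 ≤ frame_id
      · by_cases hba : b.1 ≤ a.1
        · right
          refine ⟨a, by simp [pvBStep, ha, hba], by simp, ha, ?_⟩
          intro x hx hxle
          rcases List.mem_append.1 hx with h | h
          · exact le_trans (hmax x h hxle) hba
          · simp at h; simp [h]
        · right
          refine ⟨b, by simp [pvBStep, ha, hba], List.mem_append.2 (Or.inl hbm), hble, ?_⟩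
          intro x hx hxle
          rcases List.mem_append.1 hx with h | h
          · exact hmax x h hxle
          · simp at h; subst h; omega
      · right
        refine ⟨b, by simp [pvBStep, ha], List.mem_append.2 (Or.inl hbm), hble, ?_⟩
        intro x hx hxle
        rcases List.mem_append.1 hx with h | h
        · exact hmax x h hxle
        · simp at h; subst h; exact absurd hxle ha

lemma mfold_char (l : List (Int × List (String × Int))) :
    (l = [] ∧ l.foldl pvMStep none = none) ∨
    (∃ m, l.foldl pvMStep none = some m ∧ m ∈ l ∧ ∀ x ∈ l, m.1 ≤ x.1) := by
  induction l using List.reverseRecOn with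
  | nil => left; exact ⟨rfl, rfl⟩
  | append_singleton t a ih =>
    right
    rw [List.foldl_append]
    rcases ih with ⟨ht, hn⟩ | ⟨m, hm, hmm, hmin⟩
    · subst ht
      exact ⟨a, rfl, by simp, by simp⟩
    · rw [hm]
      by_cases hlt : a.1 < m.1
      · refine ⟨a, by simp [pvMStep, hlt], by simp, ?_⟩
        intro x hx
        rcases List.mem_append.1 hx with h | h
        · exact le_trans (le_of_lt hlt) (hmin x h)
        · simp at h; simp [h]
      · refine ⟨m, by simp [pvMStep, hlt], List.mem_append.2 (Or.inl hmm), ?_⟩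
        intro x hx
        rcases List.mem_append.1 hx with h | h
        · exact hmin x h
        · simp at h; subst h; omega

-- A's reversed-sorted scan: on an antitone list the first hit is the maximum key ≤ frame_id
lemma findRev_char (frame_id : Int) (R : List Int) (hp : R.Pairwise (fun a b => b ≤ a)) :
    (match R.find? (fun idx => decide (idx ≤ frame_id)) with
     | some m => m ∈ R ∧ m ≤ frame_id ∧ ∀ x ∈ R, x ≤ frame_id → x ≤ m
     | none => ∀ x ∈ R, ¬ x ≤ frame_id) := by
  induction R with
  | nil => simp
  | cons a t ih =>
    rcases List.pairwise_cons.1 hp with ⟨hale, hpt⟩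
    by_cases ha : a ≤ frame_id
    · simp only [List.find?_cons_of_pos (p := fun idx => decide (idx ≤ frame_id)) (a := a) (by simp [ha])]
      refine ⟨by simp, ha, ?_⟩
      intro x hx _
      rcases List.mem_cons.1 hx with h | h
      · simp [h]
      · exact hale x h
    · simp only [List.find?_cons_of_neg (p := fun idx => decide (idx ≤ frame_id)) (a := a) (by simp [ha])]
      have := ih hpt
      cases hfind : t.find? (fun idx => decide (idx ≤ frame_id)) with
      | some m =>
        rw [hfind] at this
        refine ⟨List.mem_cons_of_mem _ this.1, this.2.1, ?_⟩
        intro x hx hxle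
        rcases List.mem_cons.1 hx with h | h
        · subst h; exact absurd hxle ha
        · exact this.2.2 x h hxle
      | none =>
        rw [hfind] at this
        intro x hx
        rcases List.mem_cons.1 hx with h | h
        · subst h; exact ha
        · exact this x h

-- keys of the dict built from frames = set of frames' keys
lemma keys_ofList_eq (frames : List (Int × List (String × Int))) :
    (PySem.Dict.ofList frames).keys = PySem.Set.ofList (frames.map Prod.fst) := by
  have : PySem.Dict.ofList frames =
      frames.foldl (fun d (p : Int × List (String × Int)) => d.insert p.1 p.2) PySem.Dict.empty := rfl
  rw [this]
  have h := PySem.Dict.keys_foldl_insert_key (κ := Int) (ν := List (String × Int))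
      frames Prod.fst (fun d x => x.2) PySem.Dict.empty
  simpa [PySem.Dict.keys_empty, PySem.Set.update_nil_left] using h

lemma mem_key_exists_item {κ ν : Type} [BEq κ] (d : PySem.Dict κ ν) (k : κ)
    (hk : k ∈ d.keys) : ∃ v, (k, v) ∈ d.items := by
  simp only [PySem.Dict.keys, List.mem_map] at hk
  rcases hk with ⟨p, hp, hpk⟩
  exact ⟨p.2, by simpa [← hpk] using hp⟩

lemma key_of_mem_items {κ ν : Type} [BEq κ] (d : PySem.Dict κ ν) (p : κ × ν)
    (hp : p ∈ d.items) : p.1 ∈ d.keys := by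
  simp only [PySem.Dict.keys, List.mem_map]
  exact ⟨p, hp, rfl⟩

lemma val_unique_of_nodup {κ ν : Type} [BEq κ] [LawfulBEq κ] (d : PySem.Dict κ ν)
    (hnd : d.keys.Nodup) {k : κ} {v w : ν}
    (hv : (k, v) ∈ d.items) (hw : (k, w) ∈ d.items) : v = w := by
  have h1 := PySem.Dict.getD_of_mem_items d hv hnd v
  have h2 := PySem.Dict.getD_of_mem_items d hw hnd v
  rw [h1] at h2; exact h2

-- ===== VERDICT (by name: the statement is the Claim_ definition above) =====
theorem select_frame_spec : Claim_equal_select_frame := by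
  intro frames frame_id _ hpre
  unfold Spec_select_frame select_frame select_frame_alt
  simp only [foldl_pvStepB]
  set d := PySem.Dict.ofList frames with hd
  have hnd : d.keys.Nodup := PySem.Dict.nodup_keys_ofList frames
  have hkne : d.keys ≠ [] := by
    rw [hd, keys_ofList_eq]
    cases frames with
    | nil => exact absurd rfl hpre
    | cons p t =>
      intro hcon
      have : p.1 ∈ PySem.Set.ofList ((p :: t).map Prod.fst) := by
        rw [PySem.Set.mem_ofList]; simp
      rw [hcon] at this; exact (List.not_mem_nil).elim this
  -- characterize B's two folds over d.items
  have hB := bfold_char frame_id d.items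
  have hM := mfold_char d.items
  have hkeys : d.keys = d.items.map Prod.fst := rfl
  by_cases hc : d.contains frame_id
  · -- frame_id is a key: best = the item at frame_id
    rcases mem_key_exists_item d frame_id ((PySem.Dict.contains_iff_mem_keys d frame_id).1 hc) with ⟨v, hv⟩
    rcases hB with ⟨_, hall⟩ | ⟨b, hb, hbm, hble, hmax⟩
    · exact absurd (le_refl frame_id) (hall (frame_id, v) hv)
    · have hbid : b.1 = frame_id := le_antisymm hble (hmax (frame_id, v) hv (le_refl frame_id))
      have hbv : b.2 = v := by
        have : (frame_id, b.2) ∈ d.items := by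
          have := hbm; rwa [← Prod.eta b, hbid] at this
        exact val_unique_of_nodup d hnd this hv
      simp only [hc, if_true, hb]
      rw [PySem.Dict.getD_of_mem_items d hv hnd, hbv]
  · rw [if_neg hc]
    -- the reversed sorted key list is antitone
    have hpair : (PySem.List.sorted d.keys (fun k => k)).Pairwise (fun a b => a ≤ b) :=
      PySem.List.sorted_pairwise d.keys (fun k => k)
    have hpairR : (PySem.List.sorted d.keys (fun k => k)).reverse.Pairwise (fun a b => b ≤ a) :=
      (List.pairwise_reverse).2 hpair
    have hfind := findRev_char frame_id _ hpairR
    have hmemR : ∀ x : Int, x ∈ (PySem.List.sorted d.keys (fun k => k)).reverse ↔ x ∈ d.keys := by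
      intro x; rw [List.mem_reverse, PySem.List.mem_sorted]
    cases hf : (PySem.List.sorted d.keys (fun k => k)).reverse.find? (fun idx => decide (idx ≤ frame_id)) with
    | some idx =>
      rw [hf] at hfind
      rcases hfind with ⟨hidxm, hidxle, hidxmax⟩
      have hidxk : idx ∈ d.keys := (hmemR idx).1 hidxm
      rcases mem_key_exists_item d idx hidxk with ⟨v, hv⟩
      rcases hB with ⟨_, hall⟩ | ⟨b, hb, hbm, hble, hmax⟩
      · exact absurd hidxle (hall (idx, v) hv)
      · have hbk : b.1 ∈ d.keys := key_of_mem_items d b hbm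
        have hbid : b.1 = idx := by
          have h1 : b.1 ≤ idx := hidxmax b.1 ((hmemR b.1).2 hbk) hble
          have h2 : idx ≤ b.1 := hmax (idx, v) hv hidxle
          omega
        have hbv : b.2 = v := by
          have : (idx, b.2) ∈ d.items := by
            have := hbm; rwa [← Prod.eta b, hbid] at this
          exact val_unique_of_nodup d hnd this hv
        simp only [hb]
        simp [PySem.Dict.getD_of_mem_items d hv hnd, hbv]
    | none =>
      rw [hf] at hfind
      -- no key ≤ frame_id: best = none, fall back to the minimum key
      have hnokey : ∀ x ∈ d.keys, ¬ x ≤ frame_id := fun x hx => hfind x ((hmemR x).2 hx)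
      have hbnone : d.items.foldl (pvBStep frame_id) none = none := by
        rcases hB with ⟨h, _⟩ | ⟨b, hb, hbm, hble, _⟩
        · exact h
        · exact absurd hble (hnokey b.1 (key_of_mem_items d b hbm))
      rw [hbnone]
      -- sorted keys nonempty: head exists and is minimal
      cases hs : PySem.List.sorted d.keys (fun k => k) with
      | nil => exact absurd ((PySem.List.sorted_eq_nil_iff _ _ _).1 hs) hkne
      | cons h0 t0 =>
        have hget : PySem.List.pyGet? (h0 :: t0) (0 : Int) = some h0 := by
          have := PySem.List.pyGet?_natCast (h0 :: t0) 0
          simpa using this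
        simp only [hget]
        have hh0min : ∀ y ∈ d.keys, h0 ≤ y := fun y hy => by
          simpa using PySem.List.key_head_sorted_le _ _ hs y hy
        have hh0k : h0 ∈ d.keys := by
          rw [← PySem.List.mem_sorted (key := fun k => k) (rev := false), hs]; simp
        rcases mem_key_exists_item d h0 hh0k with ⟨v, hv⟩
        rcases hM with ⟨hnil, _⟩ | ⟨m, hm, hmm, hmin⟩
        · rw [hnil] at hv; exact (List.not_mem_nil).elim hv
        · have hmk : m.1 ∈ d.keys := key_of_mem_items d m hmm
          have hmid : m.1 = h0 := le_antisymm (hmin (h0, v) hv) (hh0min m.1 hmk)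
          have hmv : m.2 = v := by
            have : (h0, m.2) ∈ d.items := by
              have := hmm; rwa [← Prod.eta m, hmid] at this
            exact val_unique_of_nodup d hnd this hv
          simp [hm, hmv, PySem.Dict.getD_of_mem_items d hv hnd]
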